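-- pv_equiv track=rewrite | github.com/rongoodbin/secret_messages | helper_functions.py | blocksoffive_decrypt
-- ===== SOURCE A (Python) =====
-- extracharlist = ["%", "^", "*", "&", "#"]
--
-- def blocksoffive_decrypt(message):
--     message = str.replace(message," ","")
--     message = str.replace(message,"_"," ")
--     output = []
--     for char in message:
--         if char in extracharlist:
--            break
--         output.append(char)
--     return "".join(output)
-- ===== SOURCE B (Python) =====
-- extracharlist = ["%", "^", "*", "&", "#"]
--
-- def blocksoffive_decrypt(message):
--     message = message.replace(" ", "").replace("_", " ")
--     positions = [message.find(c) for c in extracharlist]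
--     valid = [p for p in positions if p != -1]
--     cut = min(valid) if valid else len(message)
--     return message[:cut]
-- ===== Notes on version B (the rewrite author's own statement) =====
-- stated objective: simpler
-- what changed: Replaces A's per-character scan-with-break by computing each delimiter's first occurrence with str.find, taking the minimum as the cut point, and slicing once.
import Mathlib
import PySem

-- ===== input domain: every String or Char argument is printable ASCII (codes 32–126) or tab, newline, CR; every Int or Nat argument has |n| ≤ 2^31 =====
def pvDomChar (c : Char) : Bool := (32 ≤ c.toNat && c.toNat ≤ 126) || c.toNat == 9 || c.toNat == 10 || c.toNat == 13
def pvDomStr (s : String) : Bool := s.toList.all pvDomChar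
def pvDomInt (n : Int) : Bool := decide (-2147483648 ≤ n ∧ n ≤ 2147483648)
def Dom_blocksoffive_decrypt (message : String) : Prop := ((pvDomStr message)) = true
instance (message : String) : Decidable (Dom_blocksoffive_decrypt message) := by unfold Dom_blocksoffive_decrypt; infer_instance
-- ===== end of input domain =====

-- B replaces A's per-character scan-with-break by computing each delimiter's first occurrence
-- with str.find, taking the minimum as the cut point, and slicing once (objective: simpler).

-- ===== PORT A =====
-- the module constant; its elements are 1-char strings, so List Char is the exact representation
def extracharlist : List Char := ['%', '^', '*', '&', '#']

-- A's for-loop with break: append chars to output until a delimiter is met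
def pvLoopA : List Char → List Char → List Char
  | out, [] => out
  | out, c :: rest => if c ∈ extracharlist then out else pvLoopA (out ++ [c]) rest

def blocksoffive_decrypt (message : String) : String :=
  let m := PySem.Str.replace (PySem.Str.replace message " " "") "_" " "
  -- "".join(output) of 1-char strings is exactly the string of those chars
  String.ofList (pvLoopA [] m.toList)

-- ===== PORT B =====
def blocksoffive_decrypt_alt (message : String) : String :=
  let m := PySem.Str.replace (PySem.Str.replace message " " "") "_" " "
  let positions := extracharlist.map (fun c => PySem.Str.find m (String.ofList [c]))
  let valid := positions.filter (fun p => p ≠ -1)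
  let cut : Int := if valid.isEmpty then (m.toList.length : Int) else (PySem.List.min? valid (fun x => x)).getD 0
  PySem.Str.slice m none (some cut)

-- ===== PRECONDITION & SPEC =====
def Spec_blocksoffive_decrypt (message : String) (out : String) : Prop := out = blocksoffive_decrypt_alt message
instance (message : String) (out : String) : Decidable (Spec_blocksoffive_decrypt message out) := by unfold Spec_blocksoffive_decrypt; infer_instance

-- ===== CLAIM (what is proved, stated in full; the proofs are below) =====
def Claim_equal_blocksoffive_decrypt : Prop := ∀ (message : String), Dom_blocksoffive_decrypt message → Spec_blocksoffive_decrypt message (blocksoffive_decrypt message)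

-- ===== LEMMAS AND PROOFS =====

-- a singleton list is an infix iff its element is a member
theorem pv_singleton_infix_iff (d : Char) (cs : List Char) : [d] <:+: cs ↔ d ∈ cs := by
  constructor
  · intro h
    exact h.mem (by simp)
  · intro h
    obtain ⟨s, t, rfl⟩ := List.mem_iff_append.mp h
    exact ⟨s, t, by simp⟩

-- a singleton list is a prefix of a drop iff the element sits at that index
theorem pv_singleton_prefix_drop_iff (d : Char) (cs : List Char) (k : Nat) :
    [d] <+: cs.drop k ↔ cs[k]? = some d := by
  rw [← List.head?_drop]
  cases h : cs.drop k with
  | nil => simp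
  | cons x xs =>
    simp only [List.cons_prefix_cons, List.nil_prefix, and_true, List.head?_cons]
    exact ⟨fun he => by rw [he], fun he => by injection he with he; rw [he]⟩

-- A's loop is takeWhile (no delimiter yet)
theorem pvLoopA_eq_takeWhile (cs out : List Char) :
    pvLoopA out cs = out ++ cs.takeWhile (fun c => !decide (c ∈ extracharlist)) := by
  induction cs generalizing out with
  | nil => simp [pvLoopA]
  | cons c rest ih =>
    by_cases h : c ∈ extracharlist
    · simp [pvLoopA, h, List.takeWhile]
    · simp [pvLoopA, h, List.takeWhile, ih]

-- takeWhile is take up to the first failure index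
theorem pv_takeWhile_eq_take_findIdx (p : Char → Bool) (cs : List Char) :
    cs.takeWhile p = cs.take (cs.findIdx (fun c => !p c)) := by
  induction cs with
  | nil => simp
  | cons c t ih =>
    by_cases h : p c
    · simp [List.takeWhile, List.findIdx_cons, h, ih]
    · simp [List.takeWhile, List.findIdx_cons, h]

-- B's cut point is the index of the first delimiter (cs.length if none)
theorem pv_cut_eq_findIdx (cs : List Char) :
    (let positions := extracharlist.map (fun c => PySem.Chars.find cs [c])
     let valid := positions.filter (fun p => p ≠ -1)
     if valid.isEmpty then (cs.length : Int) else (PySem.List.min? valid (fun x => x)).getD 0)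
    = (cs.findIdx (fun c => decide (c ∈ extracharlist)) : Int) := by
  simp only
  set q : Char → Bool := fun c => decide (c ∈ extracharlist) with hq
  set valid := (extracharlist.map (fun c => PySem.Chars.find cs [c])).filter (fun p => p ≠ -1) with hv
  by_cases hemp : valid.isEmpty
  · -- no delimiter occurs: findIdx = length
    rw [if_pos hemp]
    have hnone : ∀ d ∈ extracharlist, PySem.Chars.find cs [d] = -1 := by
      intro d hd
      by_contra hne
      have : PySem.Chars.find cs [d] ∈ valid := by
        rw [hv]
        simp only [List.mem_filter, List.mem_map]
        exact ⟨⟨d, hd, rfl⟩, by simpa using hne⟩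
      rw [List.isEmpty_iff.mp hemp] at this
      simp at this
    have hall : ∀ a ∈ cs, q a = false := by
      intro a ha
      by_contra hqa
      have hmem : a ∈ extracharlist := by
        simpa [hq] using Bool.not_eq_false _ |>.mp hqa
      have := hnone a hmem
      rw [PySem.Chars.find_eq_neg_one_iff] at this
      exact this ((pv_singleton_infix_iff a cs).mpr ha)
    rw [List.findIdx_eq_length.mpr hall]
  · rw [if_neg hemp]
    obtain ⟨mv, hmv⟩ : ∃ mv, PySem.List.min? valid (fun x => x) = some mv := by
      cases h : PySem.List.min? valid (fun x => x) with
      | none =>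
        rw [PySem.List.min?_eq_none_iff] at h
        rw [h] at hemp; simp at hemp
      | some mv => exact ⟨mv, rfl⟩
    rw [hmv]
    simp only [Option.getD_some]
    -- mv = find cs [d] for some delimiter d, and mv ≥ 0
    have hmem := PySem.List.min?_mem hmv
    rw [hv, List.mem_filter] at hmem
    obtain ⟨hmap, hne⟩ := hmem
    obtain ⟨d, hd, hfd⟩ := List.mem_map.mp hmap
    have hne' : PySem.Chars.find cs [d] ≠ -1 := by rw [hfd]; simpa using hne
    have hpos : 0 ≤ mv := by
      rw [← hfd]
      exact (PySem.Chars.find_nonneg_iff cs [d]).mpr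
        ((PySem.Chars.find_ne_neg_one_iff cs [d]).mp hne')
    have hspec := PySem.Chars.find_spec (s := cs) (sub := [d]) (by rw [hfd]; exact hpos)
    have hat : cs[mv.toNat]? = some d := by
      rw [← pv_singleton_prefix_drop_iff]
      have := hspec.1; rwa [hfd] at this
    have hlt : mv.toNat < cs.length := (List.getElem?_eq_some_iff.mp hat).1
    -- findIdx ≤ mv.toNat
    have hle1 : cs.findIdx q ≤ mv.toNat := by
      by_contra hc
      obtain ⟨hlen, hall⟩ := (List.lt_findIdx_iff cs q mv.toNat).mp (Nat.lt_of_not_le hc)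
      have hfalse : q d = false := by
        have h2 : cs[mv.toNat]'hlen = d := (List.getElem?_eq_some_iff.mp hat).2
        rw [← h2]
        exact hall mv.toNat le_rfl
      rw [hq] at hfalse
      simp [hd] at hfalse
    -- mv ≤ findIdx : the char at findIdx is a delimiter d0; find cs [d0] ≤ findIdx and mv ≤ find cs [d0]
    have hfi_lt : cs.findIdx q < cs.length := lt_of_le_of_lt hle1 hlt
    set n := cs.findIdx q with hn
    have hd0 : cs[n]'hfi_lt ∈ extracharlist :=
      of_decide_eq_true (by exact List.findIdx_getElem (p := q) (xs := cs) (w := hfi_lt))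
    set d0 := cs[n]'hfi_lt with hd0def
    have hpre : [d0] <+: cs.drop n := by
      rw [pv_singleton_prefix_drop_iff]
      exact List.getElem?_eq_some_iff.mpr ⟨hfi_lt, rfl⟩
    have hne0 : PySem.Chars.find cs [d0] ≠ -1 := by
      rw [PySem.Chars.find_ne_neg_one_iff, pv_singleton_infix_iff]
      exact List.getElem_mem hfi_lt
    have hpos0 : 0 ≤ PySem.Chars.find cs [d0] :=
      (PySem.Chars.find_nonneg_iff cs [d0]).mpr
        ((PySem.Chars.find_ne_neg_one_iff cs [d0]).mp hne0)
    have hspec0 := PySem.Chars.find_spec (s := cs) (sub := [d0]) hpos0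
    have hle2 : (PySem.Chars.find cs [d0]).toNat ≤ n := by
      by_contra hc
      exact hspec0.2 n (Nat.lt_of_not_le hc) hpre
    have hvmem : PySem.Chars.find cs [d0] ∈ valid := by
      rw [hv, List.mem_filter]
      exact ⟨List.mem_map.mpr ⟨d0, hd0, rfl⟩, by simpa using hne0⟩
    have hmin := PySem.List.min?_isMin hmv _ hvmem
    -- combine: mv ≤ find cs [d0] ≤ n  and  n ≤ mv.toNat
    omega

-- the core equality on any character list
theorem pv_core (cs : List Char) :
    pvLoopA [] cs =
      (let positions := extracharlist.map (fun c => PySem.Chars.find cs [c])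
       let valid := positions.filter (fun p => p ≠ -1)
       let cut : Int := if valid.isEmpty then (cs.length : Int) else (PySem.List.min? valid (fun x => x)).getD 0
       PySem.List.slice cs none (some cut)) := by
  simp only
  rw [pv_cut_eq_findIdx]
  rw [PySem.List.slice_to cs (by positivity)]
  rw [pvLoopA_eq_takeWhile, List.nil_append,
    pv_takeWhile_eq_take_findIdx (fun c => !decide (c ∈ extracharlist))]
  simp

-- ===== VERDICT (by name: the statement is the Claim_ definition above) =====
theorem blocksoffive_decrypt_spec : Claim_equal_blocksoffive_decrypt := by
  intro message _
  unfold Spec_blocksoffive_decrypt blocksoffive_decrypt blocksoffive_decrypt_alt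
  simp only
  apply String.toList_inj.mp
  rw [String.toList_ofList, PySem.Str.toList_slice, PySem.Chars.slice_eq_listSlice]
  rw [pv_core (PySem.Str.replace (PySem.Str.replace message " " "") "_" " ").toList]
  simp only [PySem.Str.find_eq, String.toList_ofList, ]
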